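-- pv_equiv track=rewrite | github.com/mrksht/openclaw-mini | src/openclaw/agent/loop.py | _sanitize_loaded_messages
-- ===== SOURCE A (Python) =====
-- def _sanitize_loaded_messages(messages: list[dict]) -> list[dict]:
--     """Remove trailing orphaned assistant tool-call messages.
--
--     If the session was interrupted between saving an assistant message with
--     tool_calls and saving the corresponding tool results (e.g. crash, old bug),
--     those orphan messages would cause Anthropic/Bedrock to reject the request.
--
--     We walk backwards and strip any trailing assistant messages that have
--     tool_calls without subsequent tool-result messages.
--     """
--     if not messages:
--         return messages
--
--     # Walk backwards from the end — find any orphaned tool_calls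
--     while messages:
--         last = messages[-1]
--         if last.get("role") == "assistant" and last.get("tool_calls"):
--             # This assistant message has tool_calls but nothing after it
--             # (or only more orphaned assistant messages) — remove it
--             messages.pop()
--         else:
--             break
--
--     return messages
-- ===== SOURCE B (Python) =====
-- def _sanitize_loaded_messages(messages: list[dict]) -> list[dict]:
--     """Forward pass: remember the index just past the last non-orphan message,
--     then delete the trailing orphan run in one slice-delete (in place)."""
--     keep = 0
--     for i, m in enumerate(messages):
--         if not (m.get("role") == "assistant" and m.get("tool_calls")):
--             keep = i + 1
--     del messages[keep:]
--     return messages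
-- ===== Notes on version B (the rewrite author's own statement) =====
-- stated objective: alternative
-- what changed: Replaces the backward while-loop that pops one trailing orphan at a time with a single forward scan that records the index past the last non-orphan message, followed by one slice-delete; same in-place mutation and return value.
import Mathlib
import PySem

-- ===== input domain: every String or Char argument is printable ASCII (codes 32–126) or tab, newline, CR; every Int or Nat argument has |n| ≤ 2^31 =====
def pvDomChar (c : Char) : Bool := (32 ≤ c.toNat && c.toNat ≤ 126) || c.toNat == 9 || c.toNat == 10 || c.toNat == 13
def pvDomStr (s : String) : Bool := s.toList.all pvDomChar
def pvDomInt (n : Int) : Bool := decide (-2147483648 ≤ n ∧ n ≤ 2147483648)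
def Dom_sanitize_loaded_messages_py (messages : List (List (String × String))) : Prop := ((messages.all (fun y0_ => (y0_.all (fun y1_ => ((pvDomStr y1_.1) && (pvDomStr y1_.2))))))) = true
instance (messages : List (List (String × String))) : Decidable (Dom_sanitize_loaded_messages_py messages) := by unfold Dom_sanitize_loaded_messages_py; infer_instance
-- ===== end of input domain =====

-- B replaces A's backward pop-loop by one forward scan recording the last non-orphan index plus a single
-- slice-delete (alternative decomposition, same cost; equivalence here is about the return value; both
-- Pythons mutate the argument list the same way).


-- ===== PORT A =====
-- m.get("role") == "assistant" and m.get("tool_calls")  (association list: first match; missing key → None,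
-- truthiness of a str value = nonempty). Both Pythons contain this exact test.
def pvIsOrphan (m : List (String × String)) : Bool :=
  (List.lookup "role" m == some "assistant") &&
    (match List.lookup "tool_calls" m with
     | some s => !(s == "")
     | none => false)

-- the 'while messages: last = messages[-1]; if orphan: messages.pop() else: break' loop
def pvSanWhile (msgs : List (List (String × String))) : List (List (String × String)) :=
  match h : msgs.getLast? with
  | none => msgs
  | some last => if pvIsOrphan last then pvSanWhile msgs.dropLast else msgs
termination_by msgs.length
decreasing_by
  have hne : msgs ≠ [] := by intro he; simp [he] at h
  have : 0 < msgs.length := List.length_pos_iff.mpr hne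
  simp [List.length_dropLast]; omega

def sanitize_loaded_messages_py (messages : List (List (String × String))) : List (List (String × String)) :=
  if messages.isEmpty then messages else pvSanWhile messages

-- ===== PORT B =====
-- keep = 0; for i, m in enumerate(messages): if not orphan: keep = i + 1
def pvKeepOf (messages : List (List (String × String))) : Nat :=
  messages.zipIdx.foldl (fun k p => if pvIsOrphan p.1 then k else p.2 + 1) 0

-- del messages[keep:]; return messages  → the return value is the first `keep` elements
def sanitize_loaded_messages_py_alt (messages : List (List (String × String))) : List (List (String × String)) :=
  messages.take (pvKeepOf messages)

-- ===== PRECONDITION & SPEC =====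
def Spec_sanitize_loaded_messages_py (messages : List (List (String × String))) (out : List (List (String × String))) : Prop := out = sanitize_loaded_messages_py_alt messages
instance (messages : List (List (String × String))) (out : List (List (String × String))) : Decidable (Spec_sanitize_loaded_messages_py messages out) := by unfold Spec_sanitize_loaded_messages_py; infer_instance

-- ===== CLAIM (what is proved, stated in full; the proofs are below) =====
def Claim_equal_sanitize_loaded_messages_py : Prop := ∀ (messages : List (List (String × String))), Dom_sanitize_loaded_messages_py messages → Spec_sanitize_loaded_messages_py messages (sanitize_loaded_messages_py messages)

-- ===== LEMMAS AND PROOFS =====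
theorem pvKeepOf_concat (l : List (List (String × String))) (m : List (String × String)) :
    pvKeepOf (l ++ [m]) = if pvIsOrphan m then pvKeepOf l else l.length + 1 := by
  simp [pvKeepOf, List.zipIdx_append, List.foldl_append]

theorem pvKeepOf_le (l : List (List (String × String))) : pvKeepOf l ≤ l.length := by
  induction l using List.reverseRecOn with
  | nil => simp [pvKeepOf]
  | append_singleton l m ih =>
    rw [pvKeepOf_concat]
    by_cases h : pvIsOrphan m = true <;> simp [h] <;> omega

theorem pvSanWhile_concat (l : List (List (String × String))) (m : List (String × String)) :
    pvSanWhile (l ++ [m]) = if pvIsOrphan m then pvSanWhile l else l ++ [m] := by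
  rw [pvSanWhile]
  split
  · rename_i h; simp at h
  · rename_i last h
    have hm : last = m := by simpa using h.symm
    subst hm
    rw [List.dropLast_concat]

theorem pvSanWhile_eq_take (l : List (List (String × String))) :
    pvSanWhile l = l.take (pvKeepOf l) := by
  induction l using List.reverseRecOn with
  | nil => rw [pvSanWhile]; simp
  | append_singleton l m ih =>
    rw [pvSanWhile_concat, pvKeepOf_concat]
    by_cases h : pvIsOrphan m = true
    · simp only [h, if_pos]
      rw [ih, List.take_append_of_le_length (pvKeepOf_le l)]
    · simp only [h]
      simp [List.take_of_length_le]

-- ===== VERDICT (by name: the statement is the Claim_ definition above) =====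
theorem sanitize_loaded_messages_py_spec : Claim_equal_sanitize_loaded_messages_py := by
  intro messages _
  unfold Spec_sanitize_loaded_messages_py sanitize_loaded_messages_py sanitize_loaded_messages_py_alt
  by_cases h : messages = []
  · simp [h]
  · rw [if_neg (by simpa [List.isEmpty_iff] using h)]
    exact pvSanWhile_eq_take messages
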